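-- pv_equiv track=rewrite | github.com/viveksj2920/case_study | Solution_1/solve.py | solve
-- ===== SOURCE A (Python) =====
-- def solve(n):
--     #check if the input is less than 4.
--     if n<1:
--         raise ValueError("The input must be a positive integer.")
--     if n<4 and n>=1:
--         return str(2**(n-1))+'/'+str(2**n)
--     X=2
--     Y=1
--     Z=1
--     P = 4
--     count = 8
--     for i in range(4,n+1):
--         temp= Z
--         Z=Y
--         Y=X
--         X=P
--         P= count
--         count = (count-temp)*2+temp
--     return str(X+Y+Z)+'/'+str(count)
-- ===== SOURCE B (Python) =====
-- def solve(n):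
--     if n < 1:
--         raise ValueError("The input must be a positive integer.")
--     # denominators d_k satisfy d_k = d_{k-1}+d_{k-2}+d_{k-3}+d_{k-4}, with
--     # (d_0, d_{-1}, d_{-2}, d_{-3}) = (1, 1, 0, 0); numerator = d_n - d_{n-1}.
--     # Compute (d_n, d_{n-1}) via binary exponentiation of the companion matrix.
--     def mat_mul(A, B):
--         return [[sum(A[i][r] * B[r][j] for r in range(4)) for j in range(4)] for i in range(4)]
--     def mat_pow(M, k):
--         if k == 0:
--             return [[1 if i == j else 0 for j in range(4)] for i in range(4)]
--         H = mat_pow(M, k // 2)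
--         HH = mat_mul(H, H)
--         return HH if k % 2 == 0 else mat_mul(HH, M)
--     M = [[1, 1, 1, 1], [1, 0, 0, 0], [0, 1, 0, 0], [0, 0, 1, 0]]
--     P = mat_pow(M, n)
--     s0 = [1, 1, 0, 0]
--     dn = sum(P[0][r] * s0[r] for r in range(4))
--     dn1 = sum(P[1][r] * s0[r] for r in range(4))
--     return str(dn - dn1) + '/' + str(dn)
-- ===== Notes on version B (the rewrite author's own statement) =====
-- stated objective: faster
-- what changed: B replaces A's step-by-step order-4 linear recurrence loop with binary exponentiation of the 4x4 companion matrix (numerator recovered as d_n - d_{n-1}), which also absorbs A's special n<4 branch.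
import Mathlib
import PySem

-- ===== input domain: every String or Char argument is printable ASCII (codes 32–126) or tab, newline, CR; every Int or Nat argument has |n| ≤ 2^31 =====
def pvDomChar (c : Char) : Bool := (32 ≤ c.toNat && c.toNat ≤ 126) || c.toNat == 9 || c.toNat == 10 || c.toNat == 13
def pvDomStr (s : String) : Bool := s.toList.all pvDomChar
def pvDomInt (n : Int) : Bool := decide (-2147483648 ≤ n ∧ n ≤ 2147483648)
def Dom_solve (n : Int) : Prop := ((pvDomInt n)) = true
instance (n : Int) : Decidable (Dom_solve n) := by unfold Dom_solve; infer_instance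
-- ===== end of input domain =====

-- B replaces A's O(n)-step order-4 linear recurrence loop by binary exponentiation of the
-- 4x4 companion matrix (objective: asymptotically faster); return values agree for all n ≥ 1.

-- ===== PORT A =====
-- A's loop body: temp=Z; Z=Y; Y=X; X=P; P=count; count=(count-temp)*2+temp
-- state = (X, Y, Z, P, count)
def solveStep (s : Int × Int × Int × Int × Int) : Int × Int × Int × Int × Int :=
  (s.2.2.2.1, s.1, s.2.1, s.2.2.2.2, (s.2.2.2.2 - s.2.2.1) * 2 + s.2.2.1)

def solve (n : Int) : String :=
  if n < 1 then ""  -- Python raises ValueError here; excluded by Pre_solve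
  else if n < 4 ∧ 1 ≤ n then
    -- 2**(n-1) and 2**n; exact since 0 ≤ n-1 in this branch
    PySem.Int.toStr (2 ^ (n - 1).toNat) ++ "/" ++ PySem.Int.toStr (2 ^ n.toNat)
  else
    let st := (PySem.List.pyRange 4 (n + 1) 1).foldl (fun s _ => solveStep s) (2, 1, 1, 4, 8)
    PySem.Int.toStr (st.1 + st.2.1 + st.2.2.1) ++ "/" ++ PySem.Int.toStr st.2.2.2.2

-- ===== PORT B =====
-- 4-vectors and 4x4 matrices as tuples of rows
abbrev Row4 : Type := Int × Int × Int × Int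
abbrev Mat4 : Type := Row4 × Row4 × Row4 × Row4

def dot4 (u v : Row4) : Int :=
  u.1 * v.1 + u.2.1 * v.2.1 + u.2.2.1 * v.2.2.1 + u.2.2.2 * v.2.2.2

def mT (m : Mat4) : Mat4 :=
  ((m.1.1, m.2.1.1, m.2.2.1.1, m.2.2.2.1),
   (m.1.2.1, m.2.1.2.1, m.2.2.1.2.1, m.2.2.2.2.1),
   (m.1.2.2.1, m.2.1.2.2.1, m.2.2.1.2.2.1, m.2.2.2.2.2.1),
   (m.1.2.2.2, m.2.1.2.2.2, m.2.2.1.2.2.2, m.2.2.2.2.2.2))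

def mRow (r : Row4) (bt : Mat4) : Row4 :=
  (dot4 r bt.1, dot4 r bt.2.1, dot4 r bt.2.2.1, dot4 r bt.2.2.2)

def mMul (a b : Mat4) : Mat4 :=
  let bt := mT b
  (mRow a.1 bt, mRow a.2.1 bt, mRow a.2.2.1 bt, mRow a.2.2.2 bt)

def mId : Mat4 := ((1,0,0,0),(0,1,0,0),(0,0,1,0),(0,0,0,1))

def matpow (m : Mat4) : Nat → Mat4
  | 0 => mId
  | (k+1) =>
    let h := matpow m ((k+1) / 2)
    let hh := mMul h h
    if (k+1) % 2 == 0 then hh else mMul hh m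
decreasing_by exact Nat.div_lt_self (Nat.succ_pos k) (by decide)

def solve_alt (n : Int) : String :=
  if n < 1 then ""  -- Python raises ValueError here; excluded by Pre_solve
  else
    let M : Mat4 := ((1,1,1,1),(1,0,0,0),(0,1,0,0),(0,0,1,0))
    let P := matpow M n.toNat
    let s0 : Row4 := (1, 1, 0, 0)
    let dn := dot4 P.1 s0
    let dn1 := dot4 P.2.1 s0
    PySem.Int.toStr (dn - dn1) ++ "/" ++ PySem.Int.toStr dn

-- ===== PRECONDITION & SPEC =====
-- Pre_ excludes exactly n < 1, where A raises ValueError.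
def Pre_solve (n : Int) : Prop := 1 ≤ n
instance (n : Int) : Decidable (Pre_solve n) := by unfold Pre_solve; infer_instance
def pvWitness_solve : Int := (5)

def Spec_solve (n : Int) (out : String) : Prop := out = solve_alt n
instance (n : Int) (out : String) : Decidable (Spec_solve n out) := by unfold Spec_solve; infer_instance

-- ===== CLAIM (what is proved, stated in full; the proofs are below) =====
def Claim_equal_solve : Prop := ∀ (n : Int), Dom_solve n → Pre_solve n → Spec_solve n (solve n)

-- ===== LEMMAS AND PROOFS =====

-- the tetranacci sequence underlying both programs (tseq k = d_{k-3} in B's comment)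
def tseq : Nat → Int
  | 0 => 0
  | 1 => 0
  | 2 => 1
  | 3 => 1
  | (k+4) => tseq (k+3) + tseq (k+2) + tseq (k+1) + tseq k

-- naive matrix power, used to state matpow's correctness
def pownv (m : Mat4) : Nat → Mat4
  | 0 => mId
  | (k+1) => mMul m (pownv m k)

def mApply (m : Mat4) (v : Row4) : Row4 :=
  (dot4 m.1 v, dot4 m.2.1 v, dot4 m.2.2.1 v, dot4 m.2.2.2 v)

theorem mMul_assoc (a b c : Mat4) : mMul (mMul a b) c = mMul a (mMul b c) := by
  obtain ⟨⟨a1,a2,a3,a4⟩,⟨a5,a6,a7,a8⟩,⟨a9,a10,a11,a12⟩,⟨a13,a14,a15,a16⟩⟩ := a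
  obtain ⟨⟨b1,b2,b3,b4⟩,⟨b5,b6,b7,b8⟩,⟨b9,b10,b11,b12⟩,⟨b13,b14,b15,b16⟩⟩ := b
  obtain ⟨⟨c1,c2,c3,c4⟩,⟨c5,c6,c7,c8⟩,⟨c9,c10,c11,c12⟩,⟨c13,c14,c15,c16⟩⟩ := c
  simp only [mMul, mT, mRow, dot4, Prod.mk.injEq]
  and_intros <;> ring

theorem mMul_id_right (a : Mat4) : mMul a mId = a := by
  obtain ⟨⟨a1,a2,a3,a4⟩,⟨a5,a6,a7,a8⟩,⟨a9,a10,a11,a12⟩,⟨a13,a14,a15,a16⟩⟩ := a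
  simp only [mMul, mId, mT, mRow, dot4, Prod.mk.injEq]
  and_intros <;> ring

theorem mMul_id_left (a : Mat4) : mMul mId a = a := by
  obtain ⟨⟨a1,a2,a3,a4⟩,⟨a5,a6,a7,a8⟩,⟨a9,a10,a11,a12⟩,⟨a13,a14,a15,a16⟩⟩ := a
  simp only [mMul, mId, mT, mRow, dot4, Prod.mk.injEq]
  and_intros <;> ring

theorem pownv_add (m : Mat4) (a b : Nat) :
    pownv m (a + b) = mMul (pownv m a) (pownv m b) := by
  induction a with
  | zero => rw [Nat.zero_add, pownv, mMul_id_left]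
  | succ a ih =>
    have : a + 1 + b = (a + b) + 1 := by omega
    rw [this, pownv, pownv, ih, mMul_assoc]

theorem pownv_succ_right (m : Mat4) (k : Nat) :
    pownv m (k + 1) = mMul (pownv m k) m := by
  rw [pownv_add, pownv, pownv, mMul_id_right]

theorem matpow_eq (m : Mat4) : ∀ k, matpow m k = pownv m k := by
  intro k
  induction k using Nat.strong_induction_on with
  | _ k ih =>
    match k with
    | 0 => rw [matpow, pownv]
    | (k+1) =>
      rw [matpow]
      have hlt : (k+1) / 2 < k + 1 := Nat.div_lt_self (Nat.succ_pos k) (by decide)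
      rw [ih _ hlt]
      rcases Nat.even_or_odd (k+1) with he | ho
      · have h2 : (k+1) % 2 = 0 := Nat.even_iff.mp he
        have hq : (k+1) / 2 + (k+1) / 2 = k + 1 := by omega
        simp only [h2, beq_self_eq_true, if_true, ← pownv_add, hq]
      · have h2 : (k+1) % 2 = 1 := Nat.odd_iff.mp ho
        have hq : (k+1) / 2 + (k+1) / 2 + 1 = k + 1 := by omega
        simp only [h2]
        rw [show ((1:Nat) == 0) = false from rfl, if_neg (by simp), ← pownv_add,
            ← pownv_succ_right, hq]

theorem mApply_mul (a b : Mat4) (v : Row4) :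
    mApply (mMul a b) v = mApply a (mApply b v) := by
  obtain ⟨⟨a1,a2,a3,a4⟩,⟨a5,a6,a7,a8⟩,⟨a9,a10,a11,a12⟩,⟨a13,a14,a15,a16⟩⟩ := a
  obtain ⟨⟨b1,b2,b3,b4⟩,⟨b5,b6,b7,b8⟩,⟨b9,b10,b11,b12⟩,⟨b13,b14,b15,b16⟩⟩ := b
  obtain ⟨v1,v2,v3,v4⟩ := v
  simp only [mMul, mT, mRow, mApply, dot4, Prod.mk.injEq]
  and_intros <;> ring

-- the matrix power drives the tetranacci sequence
theorem pownv_apply (k : Nat) :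
    mApply (pownv ((1,1,1,1),(1,0,0,0),(0,1,0,0),(0,0,1,0)) k) (1,1,0,0)
      = (tseq (k+3), tseq (k+2), tseq (k+1), tseq k) := by
  induction k with
  | zero => decide
  | succ k ih =>
    rw [pownv, mApply_mul, ih]
    simp only [mApply, dot4, tseq]
    refine Prod.ext ?_ (Prod.ext ?_ (Prod.ext ?_ ?_)) <;> simp [add_comm, add_assoc, add_left_comm]

-- characterization of A's loop: state after k iterations
theorem loop_char (k : Nat) :
    (PySem.List.pyRange 4 (4 + (k : Int)) 1).foldl (fun s _ => solveStep s) (2, 1, 1, 4, 8)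
      = (tseq (k+4), tseq (k+3), tseq (k+2), tseq (k+5), tseq (k+6)) := by
  induction k with
  | zero =>
    rw [show (4 + ((0:Nat) : Int)) = 4 from rfl, PySem.List.pyRange_one_eq_nil (by omega)]
    decide
  | succ k ih =>
    have hsplit : (4 + ((k+1 : Nat) : Int)) = (4 + (k : Int)) + 1 := by push_cast; ring
    rw [hsplit, PySem.List.pyRange_one_succ_right (by omega), List.foldl_append, ih]
    simp only [List.foldl, solveStep]
    refine Prod.ext ?_ (Prod.ext ?_ (Prod.ext ?_ (Prod.ext ?_ ?_))) <;> (simp [tseq]; try ring)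

-- characterization of B for n ≥ 0
theorem alt_char (n : Int) (h : ¬ n < 1) :
    solve_alt n = PySem.Int.toStr (tseq (n.toNat + 3) - tseq (n.toNat + 2)) ++ "/" ++
        PySem.Int.toStr (tseq (n.toNat + 3)) := by
  have hp := pownv_apply n.toNat
  have h1 := congrArg Prod.fst hp
  have h2 := congrArg (fun v : Row4 => v.2.1) hp
  simp only [mApply] at h1 h2
  simp only [solve_alt, if_neg h, matpow_eq, h1, h2]

-- ===== VERDICT (by name: the statement is the Claim_ definition above) =====
theorem solve_spec : Claim_equal_solve := by
  intro n _ hpre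
  unfold Pre_solve at hpre
  unfold Spec_solve
  rw [alt_char n (by omega)]
  by_cases h4 : n < 4
  · interval_cases n <;> decide
  · rw [solve, if_neg (by omega), if_neg (by omega)]
    have hk : (n + 1) = 4 + ((n - 3).toNat : Int) := by omega
    have hnk : n.toNat = (n - 3).toNat + 3 := by omega
    rw [hk, loop_char, hnk]
    set k := (n - 3).toNat
    have h6 : tseq (k+6) = tseq (k+5) + tseq (k+4) + tseq (k+3) + tseq (k+2) := by
      show tseq (k+2+4) = _
      rw [tseq]
    have e1 : tseq (k+4) + tseq (k+3) + tseq (k+2) = tseq (k+3+3) - tseq (k+3+2) := by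
      have e6 : k+3+3 = k+6 := by omega
      have e5 : k+3+2 = k+5 := by omega
      rw [e6, e5, h6]; ring
    have e2 : tseq (k+6) = tseq (k+3+3) := by congr 1
    show PySem.Int.toStr (tseq (k+4) + tseq (k+3) + tseq (k+2)) ++ "/" ++
        PySem.Int.toStr (tseq (k+6)) = _
    rw [e1, e2]
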